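-- pv_equiv track=rewrite | github.com/bitterengsci/algorithm | 九章算法/线段树和树状数组/Count of Smaller Number.py | countOfSmallerNumber
-- ===== SOURCE A (Python) =====
-- def countOfSmallerNumber(A, queries):
--     if not queries: return []
--     if not A: return [0] * len(queries)
--
--     A.sort()
--
--     maps = {}
--     for i in range(len(queries)):
--         if queries[i] not in maps:
--             maps[queries[i]] = [i]
--         else:
--             maps[queries[i]].append(i)
--
--     res = [0] * len(queries)
--     count = 0
--     j = 0
--     for n in sorted(maps.keys()):
--         while j < len(A) and A[j] < n:
--             count += 1
--             j += 1
--         for l in maps[n]: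
--             res[l] = count
--
--     return res
-- ===== SOURCE B (Python) =====
-- def countOfSmallerNumber(A, queries):
--     # Direct counting: for each query, count the elements of A smaller than it.
--     # (Unlike A, this does not sort A in place; equivalence is about the return value.)
--     return [sum(1 for x in A if x < q) for q in queries]
-- ===== Notes on version B (the rewrite author's own statement) =====
-- stated objective: simpler
-- what changed: Replaces the in-place sort, the query-index grouping dict and the sorted-keys two-pointer sweep with a one-line direct count of the elements smaller than each query (return value only: B does not sort A in place).
import Mathlib
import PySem

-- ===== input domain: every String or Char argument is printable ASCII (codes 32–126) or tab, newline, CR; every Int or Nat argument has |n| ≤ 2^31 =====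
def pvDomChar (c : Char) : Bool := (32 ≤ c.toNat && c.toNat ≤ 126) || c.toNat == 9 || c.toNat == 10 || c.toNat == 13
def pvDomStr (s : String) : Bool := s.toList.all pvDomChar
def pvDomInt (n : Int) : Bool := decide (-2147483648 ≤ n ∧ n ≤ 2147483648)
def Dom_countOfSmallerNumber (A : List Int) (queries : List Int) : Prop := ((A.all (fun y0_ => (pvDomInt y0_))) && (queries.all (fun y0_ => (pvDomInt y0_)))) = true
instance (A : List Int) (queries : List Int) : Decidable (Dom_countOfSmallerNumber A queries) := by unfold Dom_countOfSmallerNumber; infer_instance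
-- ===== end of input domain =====

-- B replaces A's sort + grouping dict + two-pointer sweep with a direct per-query count of the
-- smaller elements (simpler). Equivalence is about the RETURN value only: A sorts its first
-- argument in place, B does not mutate it.


-- ===== PORT A =====
-- the 'while j < len(A) and A[j] < n: count += 1; j += 1' loop
def pvWhileA (As : List Int) (n : Int) (count : Int) (j : Nat) : Int × Nat :=
  if h : j < As.length then
    if As[j] < n then pvWhileA As n (count + 1) (j + 1) else (count, j)
  else (count, j)
termination_by As.length - j

-- the grouping loop 'for i in range(len(queries)): …' (the indices i, which Python draws from
-- range(len(queries)), are kept as Nat so that 'res[l] = count' is List.set)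
def pvMaps (queries : List Int) : PySem.Dict Int (List Nat) :=
  queries.zipIdx.foldl (fun m p =>
    match m.get? p.1 with
    | none => m.insert p.1 [p.2]
    | some l => m.insert p.1 (l ++ [p.2])) PySem.Dict.empty

def countOfSmallerNumber (A : List Int) (queries : List Int) : List Int :=
  if queries = [] then []
  else if A = [] then List.replicate queries.length (0 : Int)
  else
    let As := PySem.List.sorted A (fun x => x) false
    let maps := pvMaps queries
    let res := List.replicate queries.length (0 : Int)
    let st := (PySem.List.sorted maps.keys (fun x => x) false).foldl
      (fun (st : List Int × Int × Nat) n =>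
        let cj := pvWhileA As n st.2.1 st.2.2
        ((maps.getD n []).foldl (fun r l => r.set l cj.1) st.1, cj.1, cj.2))
      (res, 0, 0)
    st.1

-- ===== PORT B =====
def countOfSmallerNumber_alt (A : List Int) (queries : List Int) : List Int :=
  queries.map (fun q => A.foldl (fun acc x => if x < q then acc + 1 else acc) (0 : Int))

-- ===== PRECONDITION & SPEC =====
def Spec_countOfSmallerNumber (A : List Int) (queries : List Int) (out : List Int) : Prop := out = countOfSmallerNumber_alt A queries
instance (A : List Int) (queries : List Int) (out : List Int) : Decidable (Spec_countOfSmallerNumber A queries out) := by unfold Spec_countOfSmallerNumber; infer_instance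

-- ===== CLAIM (what is proved, stated in full; the proofs are below) =====
def Claim_equal_countOfSmallerNumber : Prop := ∀ (A : List Int) (queries : List Int), Dom_countOfSmallerNumber A queries → Spec_countOfSmallerNumber A queries (countOfSmallerNumber A queries)

-- ===== LEMMAS AND PROOFS =====

-- countP characterisation: if the first j elements satisfy (< n) and the rest do not, countP = j
theorem pvCountP_eq (xs : List Int) (n : Int) (j : Nat) (hj : j ≤ xs.length)
    (h1 : ∀ k (hk : k < xs.length), k < j → xs[k] < n)
    (h2 : ∀ k (hk : k < xs.length), j ≤ k → ¬ xs[k] < n) :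
    xs.countP (fun x => decide (x < n)) = j := by
  induction xs generalizing j with
  | nil =>
    have : j = 0 := by simpa using hj
    subst this; simp
  | cons x xs ih =>
    cases j with
    | zero =>
      rw [List.countP_eq_zero.2]
      intro a ha
      rw [List.mem_iff_getElem] at ha
      obtain ⟨k, hk, rfl⟩ := ha
      simpa using h2 k hk (Nat.zero_le k)
    | succ j =>
      have hx : x < n := by simpa using h1 0 (by simp) (Nat.succ_pos j)
      rw [List.countP_cons]
      have := ih j (by simpa using hj)
        (fun k hk hkj => by simpa using h1 (k+1) (by simpa) (by omega))
        (fun k hk hkj => by simpa using h2 (k+1) (by simpa) (by omega))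
      simp [this, hx]

-- in a sorted list, every index below countP (< n) holds an element < n
theorem pvSorted_prefix_lt (xs : List Int) (hs : xs.Pairwise (· ≤ ·)) (n : Int)
    (k : Nat) (hk : k < xs.length) (h : k < xs.countP (fun x => decide (x < n))) :
    xs[k] < n := by
  by_contra hge
  push Not at hge
  rw [List.pairwise_iff_getElem] at hs
  have hdrop : (xs.drop k).countP (fun x => decide (x < n)) = 0 := by
    rw [List.countP_eq_zero]
    intro a ha
    rw [List.mem_iff_getElem] at ha
    obtain ⟨m, hm, rfl⟩ := ha
    have hlen : k + m < xs.length := by simp at hm; omega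
    rw [List.getElem_drop]
    rcases Nat.eq_zero_or_pos m with h0 | h0
    · subst h0; simpa using hge
    · have := hs k (k + m) hk hlen (by omega)
      simp; omega
  have hsplit : xs.countP (fun x => decide (x < n)) =
      (xs.take k).countP (fun x => decide (x < n)) + (xs.drop k).countP (fun x => decide (x < n)) := by
    rw [← List.countP_append, List.take_append_drop]
  have htake : (xs.take k).countP (fun x => decide (x < n)) ≤ k := by
    calc (xs.take k).countP _ ≤ (xs.take k).length := List.countP_le_length
    _ ≤ k := by simp
  omega

-- the while loop lands exactly on countP (< n)
theorem pvWhileA_eq (As : List Int) (hs : As.Pairwise (· ≤ ·)) (n : Int) (j : Nat)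
    (hj : j ≤ As.length)
    (hlt : ∀ k (hk : k < As.length), k < j → As[k] < n) :
    pvWhileA As n (j : Int) j =
      ((As.countP (fun x => decide (x < n)) : Int), As.countP (fun x => decide (x < n))) := by
  have hmono := List.pairwise_iff_getElem.1 hs
  induction hfuel : As.length - j generalizing j with
  | zero =>
    rw [pvWhileA]
    simp only [show ¬ j < As.length by omega, dif_neg, not_false_iff]
    have : As.countP (fun x => decide (x < n)) = j :=
      pvCountP_eq As n j hj hlt (fun k hk hjk => by omega)
    simp [this]
  | succ m ih =>
    have hjlt : j < As.length := by omega
    rw [pvWhileA]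
    rw [dif_pos hjlt]
    by_cases hx : As[j] < n
    · rw [if_pos hx]
      have : ((j : Int) + 1) = ((j + 1 : Nat) : Int) := by push_cast; ring
      rw [this]
      exact ih (j + 1) (by omega)
        (fun k hk hkj => by
          rcases Nat.lt_succ_iff_lt_or_eq.1 hkj with h | h
          · exact hlt k hk h
          · subst h; exact hx)
        (by omega)
    · rw [if_neg hx]
      have : As.countP (fun x => decide (x < n)) = j := by
        apply pvCountP_eq As n j hj hlt
        intro k hk hjk
        rcases Nat.eq_or_lt_of_le hjk with h | h
        · subst h; exact hx
        · have := hmono j k hjlt hk h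
          omega
      simp [this]

-- the grouping dict: getD n collects exactly the indices of n, in order
theorem pvMaps_getD_aux (ps : List (Int × Nat)) (d : PySem.Dict Int (List Nat)) (n : Int) :
    (ps.foldl (fun m p =>
      match m.get? p.1 with
      | none => m.insert p.1 [p.2]
      | some l => m.insert p.1 (l ++ [p.2])) d).getD n []
      = d.getD n [] ++ (ps.filter (fun p => p.1 == n)).map (·.2) := by
  induction ps generalizing d with
  | nil => simp
  | cons p ps ih =>
    rw [List.foldl_cons, ih, List.filter_cons]
    have hstep :
        ((match d.get? p.1 with
          | none => d.insert p.1 [p.2]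
          | some l => d.insert p.1 (l ++ [p.2])).getD n [])
        = d.getD n [] ++ (if p.1 == n then [p.2] else []) := by
      by_cases hpn : p.1 = n
      · subst hpn
        rcases hg : d.get? p.1 with _ | l <;>
          simp [PySem.Dict.getD, hg]
      · have h1 : (p.1 == n) = false := by simp [hpn]
        rcases hg : d.get? p.1 with _ | l
        · rw [show (d.insert p.1 [p.2]).getD n [] = d.getD n [] from
            PySem.Dict.getD_insert_of_ne d _ _ (Ne.symm hpn)]
          simp [h1]
        · rw [show (d.insert p.1 (l ++ [p.2])).getD n [] = d.getD n [] from
            PySem.Dict.getD_insert_of_ne d _ _ (Ne.symm hpn)]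
          simp [h1]
    rw [hstep]
    by_cases hpn : (p.1 == n) = true <;> simp [hpn, List.map_cons]

theorem pvMaps_contains_aux (ps : List (Int × Nat)) (d : PySem.Dict Int (List Nat)) (n : Int) :
    (ps.foldl (fun m p =>
      match m.get? p.1 with
      | none => m.insert p.1 [p.2]
      | some l => m.insert p.1 (l ++ [p.2])) d).contains n
      = (d.contains n || ps.any (fun p => p.1 == n)) := by
  induction ps generalizing d with
  | nil => simp
  | cons p ps ih =>
    rw [List.foldl_cons, ih, List.any_cons]
    have hstep : (match d.get? p.1 with
          | none => d.insert p.1 [p.2]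
          | some l => d.insert p.1 (l ++ [p.2])).contains n
        = ((p.1 == n) || d.contains n) := by
      rcases hg : d.get? p.1 with _ | l <;>
        · rw [PySem.Dict.contains_insert]
          first
          | rw [beq_comm]
          | rw [BEq.comm]
    rw [hstep]
    cases hpn : (p.1 == n) <;> cases hdc : d.contains n <;> simp

theorem pvMaps_mem_getD (queries : List Int) (n : Int) (i : Nat) :
    i ∈ (pvMaps queries).getD n [] ↔ queries[i]? = some n := by
  unfold pvMaps
  rw [pvMaps_getD_aux]
  simp only [PySem.Dict.getD, PySem.Dict.get?_empty, Option.getD_none, List.nil_append,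
    List.mem_map, List.mem_filter]
  constructor
  · rintro ⟨p, ⟨hp, he⟩, rfl⟩
    have h1 : p.1 = n := by simpa using he
    rw [List.mem_zipIdx_iff_getElem?] at hp
    rw [← h1]
    exact hp
  · intro hq
    exact ⟨(n, i), ⟨List.mem_zipIdx_iff_getElem?.2 hq, by simp⟩, rfl⟩

theorem pvMaps_mem_keys (queries : List Int) (n : Int) :
    n ∈ (pvMaps queries).keys ↔ n ∈ queries := by
  rw [← PySem.Dict.contains_iff_mem_keys]
  unfold pvMaps
  rw [pvMaps_contains_aux]
  simp only [PySem.Dict.contains_empty, Bool.false_or, List.any_eq_true]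
  constructor
  · rintro ⟨p, hp, he⟩
    have hg := List.mem_zipIdx_iff_getElem?.1 hp
    have h1 : p.1 = n := by simpa using he
    rw [h1] at hg
    exact List.mem_of_getElem? hg
  · intro hn
    obtain ⟨i, hi, rfl⟩ := List.mem_iff_getElem.1 hn
    exact ⟨(queries[i], i), List.mem_zipIdx_iff_getElem?.2 (by simp [hi]), by simp⟩

-- 'for l in maps[n]: res[l] = count' writes c at every index of ls
theorem pvWriteAll (ls : List Nat) (res : List Int) (c : Int) (i : Nat) :
    (ls.foldl (fun r l => r.set l c) res)[i]? =
      if i ∈ ls then (if i < res.length then some c else none) else res[i]? := by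
  induction ls generalizing res with
  | nil => simp
  | cons l ls ih =>
    rw [List.foldl_cons, ih]
    simp only [List.length_set]
    by_cases hil : i ∈ ls
    · simp [hil]
    · by_cases hile : l = i
      · subst hile
        simp [hil, List.getElem?_set]
      · have hne : ¬ i = l := fun h => hile h.symm
        simp [hil, hne, hile]

theorem pvWriteAll_length (ls : List Nat) (res : List Int) (c : Int) :
    (ls.foldl (fun r l => r.set l c) res).length = res.length := by
  induction ls generalizing res with
  | nil => rfl
  | cons l ls ih => rw [List.foldl_cons, ih, List.length_set]

-- the main fold over the sorted keys, with the two-pointer state eliminated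
theorem pvFold_eq (As : List Int) (hs : As.Pairwise (· ≤ ·)) (queries : List Int)
    (ns : List Int) (hns : ns.Pairwise (· ≤ ·)) (res : List Int) (j : Nat)
    (hj : j ≤ As.length)
    (hlt : ∀ n ∈ ns, ∀ k (hk : k < As.length), k < j → As[k] < n) (i : Nat) :
    ((ns.foldl
      (fun (st : List Int × Int × Nat) n =>
        let cj := pvWhileA As n st.2.1 st.2.2
        (((pvMaps queries).getD n []).foldl (fun r l => r.set l cj.1) st.1, cj.1, cj.2))
      (res, (j : Int), j)).1)[i]?
      = match queries[i]? with
        | some q => if q ∈ ns ∧ i < res.length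
            then some ((As.countP (fun x => decide (x < q)) : Int))
            else res[i]?
        | none => res[i]? := by
  revert hj hlt i
  induction hns generalizing res j with
  | nil =>
    intro hj hlt i
    cases hq : queries[i]? <;> simp
  | @cons n ns' hn_le hns' ih =>
    intro hj hlt i
    have hw : pvWhileA As n ((j : Nat) : Int) j =
        ((As.countP (fun x => decide (x < n)) : Int), As.countP (fun x => decide (x < n))) :=
      pvWhileA_eq As hs n j hj (hlt n (List.mem_cons_self))
    set c := As.countP (fun x => decide (x < n)) with hc
    rw [List.foldl_cons]
    dsimp only
    rw [hw]
    dsimp only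
    set res1 := (((pvMaps queries).getD n []).foldl (fun r l => r.set l ((c : Int))) res) with hres1def
    have hlen1 : res1.length = res.length := pvWriteAll_length _ _ _
    have hres1 : ∀ i', res1[i']? =
        if i' ∈ (pvMaps queries).getD n [] then (if i' < res.length then some ((c : Int)) else none)
        else res[i']? := fun i' => pvWriteAll _ _ _ _
    rw [ih res1 c (List.countP_le_length)
      (fun n' hn' k hk hkc =>
        lt_of_lt_of_le (pvSorted_prefix_lt As hs n k hk hkc) (hn_le n' hn')) i]
    rcases hq : queries[i]? with _ | q
    · have hni : i ∉ (pvMaps queries).getD n [] := by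
        rw [pvMaps_mem_getD, hq]; simp
      simp [hres1 i, hni]
    · by_cases h1 : q ∈ ns'
      · by_cases h2 : i < res.length
        · simp [h1, h2, hlen1, List.mem_cons]
        · have hnone : res[i]? = none := by rw [List.getElem?_eq_none]; omega
          by_cases h3 : q = n
          · subst h3
            have hi : i ∈ (pvMaps queries).getD q [] := (pvMaps_mem_getD _ _ _).2 hq
            simp [h1, h2, hlen1]
          · have hni : i ∉ (pvMaps queries).getD n [] := by
              rw [pvMaps_mem_getD, hq]; simp [h3]
            simp [h1, h2, hlen1]
      · by_cases h3 : q = n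
        · subst h3
          have hi : i ∈ (pvMaps queries).getD q [] := (pvMaps_mem_getD _ _ _).2 hq
          by_cases h2 : i < res.length
          · dsimp only
            rw [if_neg (by simp [h1]), if_pos ⟨List.mem_cons_self, h2⟩, hres1 i,
              if_pos hi, if_pos h2]
          · have hnone : res[i]? = none := by rw [List.getElem?_eq_none]; omega
            simp [h1, h2, hlen1]
        · have hni : i ∉ (pvMaps queries).getD n [] := by
            rw [pvMaps_mem_getD, hq]; simp [h3]
          simp [h1, h3, hres1 i, hni, hlen1]

theorem countOfSmallerNumber_spec' (A : List Int) (queries : List Int) :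
    countOfSmallerNumber A queries = countOfSmallerNumber_alt A queries := by
  unfold countOfSmallerNumber countOfSmallerNumber_alt
  by_cases hq : queries = []
  · simp [hq]
  · rw [if_neg hq]
    by_cases hA : A = []
    · subst hA
      rw [if_pos rfl]
      simp [List.map_const']
    · rw [if_neg hA]
      dsimp only
      apply List.ext_getElem?
      intro i
      have hsA : (PySem.List.sorted A (fun x => x) false).Pairwise (· ≤ ·) :=
        PySem.List.sorted_pairwise A (fun x => x)
      have hnsp : (PySem.List.sorted (pvMaps queries).keys (fun x => x) false).Pairwise (· ≤ ·) :=
        PySem.List.sorted_pairwise _ _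
      have hfold := pvFold_eq (PySem.List.sorted A (fun x => x) false) hsA queries
        (PySem.List.sorted (pvMaps queries).keys (fun x => x) false) hnsp
        (List.replicate queries.length (0 : Int)) 0 (Nat.zero_le _)
        (fun n _ k _ hk0 => absurd hk0 (Nat.not_lt_zero k)) i
      simp only [Nat.cast_zero] at hfold
      rw [hfold]
      rcases hgi : queries[i]? with _ | q
      · have hle : queries.length ≤ i := List.getElem?_eq_none_iff.1 hgi
        simp [hle]
      · have hmem : q ∈ PySem.List.sorted (pvMaps queries).keys (fun x => x) false := by
          rw [PySem.List.mem_sorted, pvMaps_mem_keys]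
          exact List.mem_of_getElem? hgi
        obtain ⟨hilen, hq_eq⟩ := List.getElem?_eq_some_iff.1 hgi
        have hfoldB := PySem.List.foldl_ite_add_one (fun x => x < q) A 0
        have hperm : (PySem.List.sorted A (fun x => x) false).countP (fun x => decide (x < q))
            = A.countP (fun x => decide (x < q)) :=
          (PySem.List.sorted_perm A (fun x => x) false).countP_eq _
        simp [hmem, hilen, hperm, hfoldB, hq_eq]

-- ===== VERDICT (by name: the statement is the Claim_ definition above) =====
theorem countOfSmallerNumber_spec : Claim_equal_countOfSmallerNumber := by
  intro A queries _
  exact countOfSmallerNumber_spec' A queries
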